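-- pv_equiv track=rewrite | github.com/chabinhwang/problem-solving | Python/baekjoon_solution/solved/2529o.py | carculatemax
-- ===== SOURCE A (Python) =====
-- def findminarr(arr):
--     min=9
--     for i in arr:
--         if i<min:
--             min=i
--     return min
--
-- def carculatemax(count,arr):
--     maxarr=[9]
--     for i in range(len(arr)):
--         if arr[i]=='>':#>만났을 때
--             #배열 최소값-1 append
--             maxarr.append(findminarr(maxarr)-1)
--         else:#<만났을 때
--             maxarr[-1]-=1
--             for k in range(1,len(maxarr)):
--                 if arr[i-k]=='<':
--                     maxarr[i-k]-=1
--                 else: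
--                     break
--             #숫자 추가할 때, 앞의 수보다 1크면됨.
--             maxarr.append(maxarr[-1]+1)
--
--
--     return maxarr
-- ===== SOURCE B (Python) =====
-- def carculatemax(count, arr):
--     n = len(arr)
--     # dec[j]: how many signs decrement slot j.  A non-'>' sign decrements its own
--     # slot and every slot it can reach walking left across '<' signs, so:
--     # dec[j] = 1 + dec[j+1] inside a '<' run, 1 at a lone non-'>' sign, 0 at '>'.
--     dec = [0] * (n + 1)
--     for j in range(n - 1, -1, -1):
--         if arr[j] != '>':
--             dec[j] = 1 + (dec[j + 1] if arr[j] == '<' else 0)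
--     out = []
--     top = 9        # value the next slot starts from
--     low = None     # minimum emitted so far
--     for j in range(n + 1):
--         v = top - dec[j]
--         out.append(v)
--         low = v if low is None else min(low, v)
--         if j < n and arr[j] == '>':
--             top = low - 1
--     return out
-- ===== Notes on version B (the rewrite author's own statement) =====
-- stated objective: faster
-- what changed: Replaces A's stateful simulation (a full min-scan of the output at every '>' and a backward decrement walk at every non-'>') by two linear passes: a backward pass computing each slot's total decrement count by a one-line recurrence over '<' runs, and a forward pass emitting top - count while keeping a running minimum.
import Mathlib
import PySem

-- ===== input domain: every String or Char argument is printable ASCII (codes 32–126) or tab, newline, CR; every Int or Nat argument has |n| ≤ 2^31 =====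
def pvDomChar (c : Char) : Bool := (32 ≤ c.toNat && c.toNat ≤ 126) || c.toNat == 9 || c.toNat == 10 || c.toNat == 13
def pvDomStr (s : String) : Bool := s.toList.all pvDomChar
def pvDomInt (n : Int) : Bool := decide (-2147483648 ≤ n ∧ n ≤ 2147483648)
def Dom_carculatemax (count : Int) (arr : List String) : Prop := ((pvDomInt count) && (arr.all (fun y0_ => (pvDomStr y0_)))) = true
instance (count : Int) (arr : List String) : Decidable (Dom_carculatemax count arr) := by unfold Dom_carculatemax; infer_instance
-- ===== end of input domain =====

-- B replaces A's quadratic stateful simulation by two linear passes: a backward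
-- pass computing each slot's decrement count, then a forward pass with a running minimum.


-- ===== PORT A =====
def findminarr (arr : List Int) : Int :=
  arr.foldl (fun mn i => if i < mn then i else mn) 9

-- 'xs[j] -= 1' at Python index j (negative j counts from the end).  In A the
-- index is always in range, so the IndexError branch (returning xs) is unreachable.
def pySub1At (xs : List Int) (j : Int) : List Int :=
  let k : Int := if j < 0 then j + xs.length else j
  if 0 ≤ k ∧ k < (xs.length : Int) then xs.set k.toNat (xs.getD k.toNat 0 - 1) else xs

-- 'for k in range(1, len(maxarr)): if arr[i-k]=="<": maxarr[i-k]-=1 else: break'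
def innerLoopA (arr : List String) (i : Int) : Nat → Int → List Int → List Int
  | 0, _, m => m
  | fuel+1, k, m =>
    if PySem.List.pyGet? arr (i - k) = some "<" then
      innerLoopA arr i fuel (k + 1) (pySub1At m (i - k))
    else m

def stepA (arr : List String) (maxarr : List Int) (i : Nat) : List Int :=
  if PySem.List.pyGet? arr (i : Int) = some ">" then
    maxarr ++ [findminarr maxarr - 1]
  else
    let m1 := pySub1At maxarr (-1)
    let m2 := innerLoopA arr (i : Int) (m1.length - 1) 1 m1
    m2 ++ [(PySem.List.pyGet? m2 (-1)).getD 0 + 1]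

def carculatemax (count : Int) (arr : List String) : List Int :=
  (List.range arr.length).foldl (stepA arr) [9]

-- ===== PORT B =====
-- backward pass of Source B: dListB arr = [dec[0], …, dec[n]]
-- (dec[j] = 1 + (dec[j+1] if arr[j]=='<' else 0) at a non-'>' sign, 0 at '>')
def dListB : List String → List Int
  | [] => [0]
  | c :: rest =>
    let ds := dListB rest
    (if c ≠ ">" then 1 + (if c = "<" then ds.headD 0 else 0) else 0) :: ds

-- forward pass of Source B with state (top, low)
def fwdB : List String → List Int → Int → Option Int → List Int
  | [], d :: _, top, _ => [top - d]
  | [], [], _, _ => []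
  | s :: ss, d :: ds, top, low =>
    let v := top - d
    let low' : Int := match low with | none => v | some m => min m v
    v :: fwdB ss ds (if s = ">" then low' - 1 else top) (some low')
  | _ :: _, [], _, _ => []

def carculatemax_alt (count : Int) (arr : List String) : List Int :=
  fwdB arr (dListB arr) 9 none

-- ===== PRECONDITION & SPEC =====
def Spec_carculatemax (count : Int) (arr : List String) (out : List Int) : Prop := out = carculatemax_alt count arr
instance (count : Int) (arr : List String) (out : List Int) : Decidable (Spec_carculatemax count arr out) := by unfold Spec_carculatemax; infer_instance

-- ===== CLAIM (what is proved, stated in full; the proofs are below) =====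
def Claim_equal_carculatemax : Prop := ∀ (count : Int) (arr : List String), Dom_carculatemax count arr → Spec_carculatemax count arr (carculatemax count arr)

-- ===== LEMMAS AND PROOFS =====

-- length of the maximal run of "<" ending at index t-1
def brA (arr : List String) : Nat → Nat
  | 0 => 0
  | t+1 => if arr.getD t "" = "<" then brA arr t + 1 else 0

-- does step i decrement position j?
def decStep (arr : List String) (j i : Nat) : Bool :=
  (!(arr.getD i "" == ">")) && (decide (j ≤ i)) && (decide (i - brA arr i ≤ j))

-- number of decrements of position j by the first t steps
def Dlt (arr : List String) (t j : Nat) : Nat :=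
  (List.range t).countP (fun i => decStep arr j i)

def DD (arr : List String) (j : Nat) : Nat := Dlt arr arr.length j

-- (appended value at position j, running minimum of final values over 0..j)
def stS (arr : List String) : Nat → Int × Int
  | 0 => (9, 9 - (DD arr 0 : Int))
  | j+1 =>
    let p := stS arr j
    let a := if arr.getD j "" = ">" then p.2 - 1 else p.1
    (a, min p.2 (a - (DD arr (j+1) : Int)))

def finS (arr : List String) (j : Nat) : Int := (stS arr j).1 - (DD arr j : Int)

theorem brA_le (arr : List String) : ∀ i, brA arr i ≤ i := by
  intro i; induction i with
  | zero => simp [brA]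
  | succ t ih => simp only [brA]; split <;> omega

theorem run_all_lt (arr : List String) : ∀ i t, t < i → i - brA arr i ≤ t → arr.getD t "" = "<" := by
  intro i
  induction i with
  | zero => omega
  | succ m ih =>
    intro t ht hbr
    by_cases h : arr.getD m "" = "<"
    · rcases Nat.lt_or_ge t m with h2 | h2
      · have : brA arr (m+1) = brA arr m + 1 := by simp only [brA]; rw [if_pos h]
        exact ih t h2 (by omega)
      · have : t = m := by omega
        rw [this]; exact h
    · have : brA arr (m+1) = 0 := by simp only [brA]; rw [if_neg h]
      omega

theorem sub1_map_range (h : Nat → Int) (m idx : Nat) (hidx : idx < m) :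
    pySub1At ((List.range m).map h) (idx : Int) =
      (List.range m).map (fun j => if j = idx then h j - 1 else h j) := by
  have hlen : ((List.range m).map h).length = m := by simp
  simp only [pySub1At, hlen]
  have h0 : ¬ ((idx : Int) < 0) := by omega
  rw [if_neg h0, if_pos (by constructor <;> omega)]
  have htn : (idx : Int).toNat = idx := by omega
  rw [htn]
  have hget : ((List.range m).map h).getD idx 0 = h idx := by
    simp [List.getD, List.getElem?_map, List.getElem?_range hidx]
  rw [hget]
  apply List.ext_getElem
  · simp
  · intro n h1 h2
    simp only [List.getElem_set, List.getElem_map, List.getElem_range] at *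
    split
    · simp_all
    · have : n ≠ idx := by omega
      simp [this]

theorem sub1_map_range_neg1 (h : Nat → Int) (t : Nat) :
    pySub1At ((List.range (t+1)).map h) (-1) =
      (List.range (t+1)).map (fun j => if j = t then h j - 1 else h j) := by
  have hlen : ((List.range (t+1)).map h).length = t+1 := by simp
  simp only [pySub1At, hlen]
  rw [if_pos (by omega), if_pos (by constructor <;> omega)]
  have htn : ((-1 : Int) + (t+1 : Nat)).toNat = t := by omega
  rw [htn]
  have hget : ((List.range (t+1)).map h).getD t 0 = h t := by
    simp [List.getD, List.getElem?_map, List.getElem?_range (by omega : t < t+1)]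
  rw [hget]
  apply List.ext_getElem
  · simp
  · intro n h1 h2
    simp only [List.getElem_set, List.getElem_map, List.getElem_range] at *
    split
    · simp_all
    · have : n ≠ t := by omega
      simp [this]

theorem Dlt_zero (arr : List String) (j : Nat) : Dlt arr 0 j = 0 := by
  simp [Dlt]

theorem Dlt_succ (arr : List String) (t j : Nat) :
    Dlt arr (t+1) j = Dlt arr t j + (if decStep arr j t then 1 else 0) := by
  simp [Dlt, List.range_succ, List.countP_append, List.countP_cons]

theorem Dlt_of_le (arr : List String) (t j : Nat) (h : t ≤ j) : Dlt arr t j = 0 := by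
  induction t with
  | zero => simp [Dlt]
  | succ m ih =>
    rw [Dlt_succ, ih (by omega)]
    have : decStep arr j m = false := by
      simp only [decStep]
      have : ¬ (j ≤ m) := by omega
      simp [this]
    simp [this]

theorem Dlt_ext (arr : List String) (j : Nat) :
    ∀ m t, t ≤ m → (∀ i, t ≤ i → i < m → decStep arr j i = false) →
      Dlt arr m j = Dlt arr t j := by
  intro m
  induction m with
  | zero => intro t h _; interval_cases t; rfl
  | succ k ih =>
    intro t ht hf
    by_cases h : t = k + 1
    · rw [h]
    · have htk : t ≤ k := by omega
      rw [Dlt_succ, ih t htk (fun i h1 h2 => hf i h1 (by omega)), hf k htk (by omega)]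
      simp

-- at a '>' step t, positions j ≤ t already hold their final values
theorem Dlt_final_at_gt (arr : List String) (t j : Nat) (ht : arr.getD t "" = ">")
    (hj : j ≤ t) (htn : t ≤ arr.length) : DD arr j = Dlt arr t j := by
  apply Dlt_ext arr j arr.length t htn
  intro i h1 _
  simp only [decStep]
  rcases Nat.eq_or_lt_of_le h1 with h | h
  · rw [← h, ht]; simp
  · by_cases hc : i - brA arr i ≤ j
    · have := run_all_lt arr i t (by omega) (by omega)
      rw [this] at ht; simp at ht
    · simp [hc]

theorem findminarr_finS (arr : List String) : ∀ t,
    findminarr ((List.range (t+1)).map (finS arr)) = (stS arr t).2 := by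
  intro t
  induction t with
  | zero =>
    simp only [Nat.zero_add, List.range_one, List.map_cons, List.map_nil, findminarr,
      List.foldl_cons, List.foldl_nil, finS, stS]
    split <;> omega
  | succ k ih =>
    have step : (List.range (k+2)).map (finS arr) =
        (List.range (k+1)).map (finS arr) ++ [finS arr (k+1)] := by
      rw [List.range_succ, List.map_append]; rfl
    rw [step]
    simp only [findminarr, List.foldl_append, List.foldl] at *
    rw [ih]
    simp only [stS]
    have hfin2 : (if arr.getD k "" = ">" then (stS arr k).2 - 1 else (stS arr k).1)
        - (DD arr (k+1) : Int) = finS arr (k+1) := by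
      simp only [finS, stS]
    rw [hfin2, min_def]
    split_ifs <;> omega

-- characterisation of the inner backward loop on a map-over-range list
theorem innerLoopA_spec (arr : List String) (t : Nat) (htn : t < arr.length) :
    ∀ fuel k (h : Nat → Int), 1 ≤ k → k + fuel = t + 1 →
      innerLoopA arr (t : Int) fuel (k : Int) ((List.range (t+1)).map h) =
        (List.range (t+1)).map
          (fun j => if j + k ≤ t ∧ t + 1 - k - brA arr (t + 1 - k) ≤ j then h j - 1 else h j) := by
  intro fuel
  induction fuel with
  | zero =>
    intro k h hk hkf
    have : ∀ j, ¬ (j + k ≤ t ∧ t + 1 - k - brA arr (t + 1 - k) ≤ j) := by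
      intro j hc; omega
    simp only [innerLoopA]
    apply List.map_congr_left
    intro j _
    rw [if_neg (this j)]
  | succ fuel ih =>
    intro k h hk hkf
    have hik : t - k < arr.length := by omega
    have hix : ((t : Int) - (k : Int)) = ((t - k : Nat) : Int) := by omega
    have hget : PySem.List.pyGet? arr ((t : Int) - (k : Int)) = some (arr.getD (t-k) "") := by
      rw [hix, PySem.List.pyGet?_natCast]
      simp [List.getElem?_eq_getElem hik, List.getD, List.getElem?_eq_getElem hik]
    simp only [innerLoopA, hget]
    by_cases hc : arr.getD (t-k) "" = "<"
    · rw [if_pos (by simp only [Option.some.injEq]; exact hc)]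
      rw [hix, sub1_map_range _ (t+1) (t-k) (by omega)]
      have hcast : ((k : Int) + 1) = ((k+1 : Nat) : Int) := by omega
      rw [hcast, ih (k+1) _ (by omega) (by omega)]
      have hbr : brA arr (t + 1 - k) = brA arr (t - k) + 1 := by
        have : t + 1 - k = (t - k) + 1 := by omega
        rw [this]; simp only [brA]; rw [if_pos hc]
      apply List.map_congr_left
      intro j hj
      simp only [List.mem_range] at hj
      by_cases h1 : j = t - k
      · have c2 : ¬ (j + (k+1) ≤ t ∧ t + 1 - (k+1) - brA arr (t + 1 - (k+1)) ≤ j) := by omega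
        have c1 : j + k ≤ t ∧ t + 1 - k - brA arr (t + 1 - k) ≤ j := by
          constructor
          · omega
          · rw [hbr]; omega
        rw [if_neg c2, if_pos h1, if_pos c1]
      · rcases Nat.lt_or_ge j (t - k) with h2 | h2
        · have e1 : t + 1 - (k+1) - brA arr (t + 1 - (k+1)) = t - k - brA arr (t - k) := by
            have : t + 1 - (k+1) = t - k := by omega
            rw [this]
          by_cases c : t - k - brA arr (t - k) ≤ j
          · rw [if_pos (by rw [e1]; omega), if_neg h1, if_pos (by rw [hbr]; omega)]
          · rw [if_neg (by rw [e1]; omega), if_neg h1, if_neg (by rw [hbr]; omega)]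
        · have c2 : ¬ (j + (k+1) ≤ t ∧ t + 1 - (k+1) - brA arr (t + 1 - (k+1)) ≤ j) := by omega
          have c1 : ¬ (j + k ≤ t ∧ t + 1 - k - brA arr (t + 1 - k) ≤ j) := by
            intro hc'; omega
          rw [if_neg c2, if_neg h1, if_neg c1]
    · rw [if_neg (by simp only [Option.some.injEq]; exact hc)]
      have hbr : brA arr (t + 1 - k) = 0 := by
        have : t + 1 - k = (t - k) + 1 := by omega
        rw [this]; simp only [brA]; rw [if_neg hc]
      apply List.map_congr_left
      intro j _
      have : ¬ (j + k ≤ t ∧ t + 1 - k - brA arr (t + 1 - k) ≤ j) := by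
        rw [hbr]; omega
      rw [if_neg this]

theorem pyGet?_map_range_last (F : Nat → Int) (t : Nat) :
    PySem.List.pyGet? ((List.range (t+1)).map F) (-1) = some (F t) := by
  rw [show (List.range (t+1)).map F = (List.range t).map F ++ [F t] by
    rw [List.range_succ, List.map_append]; rfl]
  exact PySem.List.pyGet?_neg_one_append_singleton _ _

-- main A-side invariant
theorem foldA_spec (arr : List String) : ∀ t, t ≤ arr.length →
    (List.range t).foldl (stepA arr) [9] =
      (List.range (t+1)).map (fun j => (stS arr j).1 - (Dlt arr t j : Int)) := by
  intro t
  induction t with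
  | zero =>
    intro _
    simp [Dlt_zero, stS]
  | succ t ih =>
    intro ht
    have htn : t < arr.length := by omega
    rw [List.range_succ, List.foldl_append, List.foldl_cons, List.foldl_nil,
        ih (by omega)]
    have hget : PySem.List.pyGet? arr (t : Int) = some (arr.getD t "") := by
      rw [PySem.List.pyGet?_natCast]
      simp [List.getD, List.getElem?_eq_getElem htn]
    by_cases hgt : arr.getD t "" = ">"
    · -- '>' step: append min - 1
      simp only [stepA]
      rw [if_pos (by rw [hget, hgt])]
      have hfinal : ∀ j ∈ List.range (t+1),
          (stS arr j).1 - (Dlt arr t j : Int) = finS arr j := by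
        intro j hj
        simp only [List.mem_range] at hj
        rw [finS, Dlt_final_at_gt arr t j hgt (by omega) (by omega)]
      rw [List.map_congr_left hfinal, findminarr_finS arr t]
      rw [show List.range (t+1+1) = List.range (t+1) ++ [t+1] from List.range_succ, List.map_append]
      congr 1
      · apply List.map_congr_left
        intro j hj
        simp only [List.mem_range] at hj
        have hbeq : (arr[t]?.getD "" == ">") = true := by
          rw [beq_iff_eq]; exact hgt
        have hdec : decStep arr j t = false := by simp [decStep, hbeq]
        have h2 : Dlt arr (t+1) j = Dlt arr t j := by
          rw [Dlt_succ, hdec]; simp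
        rw [finS, Dlt_final_at_gt arr t j hgt (by omega) (by omega), h2]
      · simp only [List.map_cons, List.map_nil]
        congr 1
        rw [Dlt_of_le arr (t+1) (t+1) (le_refl _)]
        simp only [stS, if_pos hgt]
        omega
    · -- else step
      simp only [stepA]
      rw [if_neg (by rw [hget]; simp only [Option.some.injEq]; exact hgt)]
      rw [sub1_map_range_neg1]
      rw [show ((List.range (t+1)).map (fun j => if j = t then (stS arr j).1 - (Dlt arr t j : Int) - 1 else (stS arr j).1 - (Dlt arr t j : Int))).length = t + 1 by simp]
      rw [show t + 1 - 1 = t by omega]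
      have hspec := innerLoopA_spec arr t htn t 1
        (fun j => if j = t then (stS arr j).1 - (Dlt arr t j : Int) - 1 else (stS arr j).1 - (Dlt arr t j : Int))
        (le_refl 1) (by omega)
      push_cast at hspec
      rw [hspec, pyGet?_map_range_last, Option.getD_some]
      have hgt' : ¬ (arr[t]?.getD "" = ">") := hgt
      have hg2t : ∀ j, j < t + 1 →
          (if j + 1 ≤ t ∧ t - brA arr t ≤ j
            then (if j = t then (stS arr j).1 - (Dlt arr t j : Int) - 1 else (stS arr j).1 - (Dlt arr t j : Int)) - 1
            else (if j = t then (stS arr j).1 - (Dlt arr t j : Int) - 1 else (stS arr j).1 - (Dlt arr t j : Int)))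
          = (stS arr j).1 - (Dlt arr (t+1) j : Int) := by
        intro j hj
        rw [Dlt_succ]
        have hbeq : (arr[t]?.getD "" == ">") = false := by
          rw [beq_eq_false_iff_ne]; exact hgt
        have hds : decStep arr j t = ((decide (j ≤ t)) && (decide (t - brA arr t ≤ j))) := by
          simp [decStep, hbeq]
        by_cases hjt : j = t
        · have c1 : ¬ (j + 1 ≤ t ∧ t - brA arr t ≤ j) := by omega
          have hd : decStep arr j t = true := by rw [hds]; simp; omega
          rw [if_neg c1, if_pos hjt, hd]
          simp; omega
        · by_cases c : t - brA arr t ≤ j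
          · have c1 : j + 1 ≤ t ∧ t - brA arr t ≤ j := by
              simp only [List.mem_range] at hj
              exact ⟨by omega, c⟩
            have hd : decStep arr j t = true := by rw [hds]; simp; omega
            rw [if_pos c1, if_neg hjt, hd]
            simp; omega
          · have c1 : ¬ (j + 1 ≤ t ∧ t - brA arr t ≤ j) := by
              intro hc; omega
            have hd : decStep arr j t = false := by rw [hds]; simp; omega
            rw [if_neg c1, if_neg hjt, hd]
            simp
      rw [show List.range (t+1+1) = List.range (t+1) ++ [t+1] from List.range_succ, List.map_append]
      congr 1
      · apply List.map_congr_left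
        intro j hj
        simp only [List.mem_range] at hj
        exact hg2t j hj
      · simp only [List.map_cons, List.map_nil]
        congr 1
        have h0 : Dlt arr t t = 0 := Dlt_of_le arr t t (le_refl _)
        have h1 : Dlt arr (t+1) (t+1) = 0 := Dlt_of_le arr (t+1) (t+1) (le_refl _)
        have h2 : (stS arr (t+1)).1 = (stS arr t).1 := by simp only [stS, if_neg hgt]
        rw [h1, h2]
        split_ifs <;> omega

-- ===== B-side lemmas =====

theorem brA_cons (c : String) (rest : List String) : ∀ i,
    brA (c :: rest) (i+1) = if brA rest i = i ∧ c = "<" then i + 1 else brA rest i := by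
  intro i
  induction i with
  | zero =>
    by_cases h : c = "<" <;> simp [brA, h]
  | succ m ih =>
    have hb := brA_le rest m
    have e1 : brA (c :: rest) (m+1+1) =
        if (c :: rest).getD (m+1) "" = "<" then brA (c :: rest) (m+1) + 1 else 0 := rfl
    have e2 : brA rest (m+1) = if rest.getD m "" = "<" then brA rest m + 1 else 0 := rfl
    by_cases h : rest.getD m "" = "<"
    · have h' : (c :: rest).getD (m+1) "" = "<" := by simpa using h
      rw [e1, if_pos h', ih, e2, if_pos h]
      by_cases h2 : brA rest m = m ∧ c = "<"
      · rw [if_pos h2, if_pos ⟨by omega, h2.2⟩]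
      · rw [if_neg h2, if_neg (by intro hc; exact h2 ⟨by omega, hc.2⟩)]
    · have h' : ¬ (c :: rest).getD (m+1) "" = "<" := by simpa using h
      rw [e1, if_neg h', e2, if_neg h]
      rw [if_neg (by intro hc; omega)]

theorem decStep_cons (c : String) (rest : List String) (j i : Nat) :
    decStep (c :: rest) (j+1) (i+1) = decStep rest j i := by
  have hb := brA_le rest i
  have hg : (c :: rest).getD (i+1) "" = rest.getD i "" := by simp
  simp only [decStep, hg, brA_cons]
  by_cases h : brA rest i = i ∧ c = "<"
  · rw [if_pos h]
    congr 1
    · congr 1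
      simp only [decide_eq_decide]
      omega
    · simp only [decide_eq_decide]
      rw [h.1]
      omega
  · rw [if_neg h]
    congr 1
    · congr 1
      simp only [decide_eq_decide]
      omega
    · simp only [decide_eq_decide]
      omega

theorem countP_ext (p q : Nat → Bool) (l : List Nat) (h : ∀ a ∈ l, p a = q a) :
    l.countP p = l.countP q := by
  induction l with
  | nil => rfl
  | cons x xs ih =>
    simp only [List.countP_cons, h x (by simp), ih (fun a ha => h a (by simp [ha]))]

theorem countP_range_succ_shift (p : Nat → Bool) (n : Nat) :
    (List.range (n+1)).countP p = (List.range n).countP (fun i => p (i+1)) + (if p 0 then 1 else 0) := by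
  rw [List.range_succ_eq_map, List.countP_cons, List.countP_map]
  have : (p ∘ Nat.succ) = fun i => p (i+1) := by funext i; rfl
  rw [this]

theorem DD_cons_succ (c : String) (rest : List String) (j : Nat) :
    DD (c :: rest) (j+1) = DD rest j := by
  simp only [DD, Dlt, List.length_cons]
  rw [countP_range_succ_shift]
  have h0 : decStep (c :: rest) (j+1) 0 = false := by simp [decStep]
  rw [h0, countP_ext _ _ _ (fun i _ => decStep_cons c rest j i)]
  simp

theorem DD_nil (j : Nat) : DD [] j = 0 := by simp [DD, Dlt]

theorem decStep_cons_zero (c : String) (rest : List String) (i : Nat) :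
    decStep (c :: rest) 0 (i+1) =
      ((!(rest.getD i "" == ">")) && (decide (brA rest i = i)) && (decide (c = "<"))) := by
  have hb := brA_le rest i
  have hg : (c :: rest).getD (i+1) "" = rest.getD i "" := by simp
  simp only [decStep, hg, brA_cons]
  by_cases h : brA rest i = i ∧ c = "<"
  · rw [if_pos h]
    have e1 : decide ((0:Nat) ≤ i+1) = true := by simp
    have e2 : decide (i + 1 - (i+1) ≤ 0) = true := by simp
    rw [e1, e2, Bool.and_true, Bool.and_true]
    have e3 : decide (brA rest i = i) = true := by simp [h.1]
    have e4 : decide (c = "<") = true := by simp [h.2]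
    rw [e3, e4, Bool.and_true, Bool.and_true]
  · rw [if_neg h]
    have e2 : decide (i + 1 - brA rest i ≤ 0) = false := by
      simp only [decide_eq_false_iff_not]; omega
    rw [e2, Bool.and_false]
    rcases not_and_or.mp h with h3 | h3
    · have e3 : decide (brA rest i = i) = false := by simp [h3]
      rw [e3]
      simp
    · have e4 : decide (c = "<") = false := by simp [h3]
      rw [e4]
      simp

theorem DD_zero (c : String) (rest : List String) :
    DD (c :: rest) 0 = if c = ">" then 0 else if c ≠ "<" then 1 else 1 + DD rest 0 := by
  simp only [DD, Dlt, List.length_cons]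
  rw [countP_range_succ_shift,
      countP_ext _ _ _ (fun i _ => decStep_cons_zero c rest i)]
  by_cases hgt : c = ">"
  · have h0 : decStep (c :: rest) 0 0 = false := by
      simp [decStep, hgt]
    have hin : ∀ i ∈ List.range rest.length,
        ((!(rest.getD i "" == ">")) && (decide (brA rest i = i)) && (decide (c = "<"))) = false := by
      intro i _
      have : decide (c = "<") = false := by simp [hgt]
      rw [this, Bool.and_false]
    rw [h0, countP_ext _ _ _ hin]
    simp [hgt]
  · have h0 : decStep (c :: rest) 0 0 = true := by
      simp [decStep, brA, hgt]
    rw [h0]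
    by_cases hlt : c = "<"
    · have hin : ∀ i ∈ List.range rest.length,
          ((!(rest.getD i "" == ">")) && (decide (brA rest i = i)) && (decide (c = "<"))) =
          ((!(rest.getD i "" == ">")) && (decide (brA rest i = i))) := by
        intro i _
        have : decide (c = "<") = true := by simp [hlt]
        rw [this, Bool.and_true]
      rw [countP_ext _ _ _ hin]
      have hD : DD rest 0 = (List.range rest.length).countP
          (fun i => ((!(rest.getD i "" == ">")) && (decide (brA rest i = i)))) := by
        simp only [DD, Dlt]
        apply countP_ext
        intro i _
        have hb := brA_le rest i
        simp only [decStep]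
        have e1 : decide ((0:Nat) ≤ i) = true := by simp
        have e2 : decide (i - brA rest i ≤ 0) = decide (brA rest i = i) := by
          simp only [decide_eq_decide]; omega
        rw [e1, e2, Bool.and_true]
      simp only [DD, Dlt] at hD
      rw [hD, if_neg hgt, if_neg (fun h : c ≠ "<" => h hlt), if_pos rfl]
      omega
    · have hin : ∀ i ∈ List.range rest.length,
          ((!(rest.getD i "" == ">")) && (decide (brA rest i = i)) && (decide (c = "<"))) = false := by
        intro i _
        have : decide (c = "<") = false := by simp [hlt]
        rw [this, Bool.and_false]
      rw [countP_ext _ _ _ hin, if_neg hgt, if_pos hlt]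
      simp

theorem dListB_spec : ∀ arr : List String,
    dListB arr = (List.range (arr.length + 1)).map (fun j => (DD arr j : Int)) := by
  intro arr
  induction arr with
  | nil => simp [dListB, DD_nil]
  | cons c rest ih =>
    simp only [dListB, ih]
    have hshift : (List.range (rest.length + 1 + 1)).map (fun j => (DD (c :: rest) j : Int)) =
        (DD (c :: rest) 0 : Int) :: (List.range (rest.length + 1)).map (fun j => (DD rest j : Int)) := by
      rw [List.range_succ_eq_map, List.map_cons, List.map_map]
      congr 1
      apply List.map_congr_left
      intro j _
      simp [Function.comp, DD_cons_succ]
    simp only [List.length_cons]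
    rw [hshift]
    congr 1
    have hhead : ((List.range (rest.length + 1)).map (fun j => (DD rest j : Int))).headD 0 = (DD rest 0 : Int) := by
      rw [List.range_succ_eq_map, List.map_cons]
      rfl
    rw [hhead, DD_zero]
    by_cases hgt : c = ">"
    · simp [hgt]
    · by_cases hlt : c = "<"
      · rw [if_pos (show c ≠ ">" from hgt), if_pos hlt, if_neg hgt,
            if_neg (fun h : c ≠ "<" => h hlt)]
        push_cast
        ring
      · rw [if_pos (show c ≠ ">" from hgt), if_neg hlt, if_neg hgt, if_pos hlt]
        simp

theorem fwdB_spec (arr : List String) : ∀ l j, j + l = arr.length →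
    fwdB (arr.drop j) ((List.range' j (l+1)).map (fun x => (DD arr x : Int)))
        ((stS arr j).1)
        (if j = 0 then none else some ((stS arr (j-1)).2)) =
      (List.range' j (l+1)).map (finS arr) := by
  intro l
  induction l with
  | zero =>
    intro j hj
    rw [List.drop_of_length_le (by omega)]
    rw [show List.range' j (0+1) = [j] by simp]
    simp only [List.map_cons, List.map_nil]
    rfl
  | succ l ih =>
    intro j hj
    have hjl : j < arr.length := by omega
    rw [List.drop_eq_getElem_cons hjl]
    have hr : List.range' j (l+1+1) = j :: List.range' (j+1) (l+1) := by
      rw [List.range'_succ]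
    rw [hr]
    simp only [List.map_cons]
    simp only [fwdB]
    have hrm' : (match (if j = 0 then none else some ((stS arr (j-1)).2)) with
        | none => (stS arr j).1 - (DD arr j : Int)
        | some m => min m ((stS arr j).1 - (DD arr j : Int))) = (stS arr j).2 := by
      by_cases h0 : j = 0
      · subst h0
        simp [stS]
      · rw [if_neg h0]
        obtain ⟨j', rfl⟩ : ∃ j', j = j' + 1 := ⟨j - 1, by omega⟩
        simp only [Nat.add_sub_cancel]
        simp only [stS]
    have hgetD : arr[j] = arr.getD j "" := by
      simp [List.getD, List.getElem?_eq_getElem hjl]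
    congr 1
    rw [hrm', hgetD]
    have happ : (if arr.getD j "" = ">" then (stS arr j).2 - 1 else (stS arr j).1) = (stS arr (j+1)).1 := by
      simp [stS]
    rw [happ]
    have := ih (j+1) (by omega)
    rw [if_neg (by omega)] at this
    simp only [Nat.add_sub_cancel] at this
    exact this

-- ===== VERDICT (by name: the statement is the Claim_ definition above) =====
theorem carculatemax_spec : Claim_equal_carculatemax := by
  unfold Claim_equal_carculatemax
  intro count arr _
  unfold Spec_carculatemax
  rw [carculatemax, carculatemax_alt]
  rw [foldA_spec arr arr.length (le_refl _)]
  rw [dListB_spec arr]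
  have := fwdB_spec arr arr.length 0 (by omega)
  rw [if_pos rfl] at this
  simp only [List.drop_zero] at this
  rw [show (stS arr 0).1 = 9 from rfl] at this
  rw [show List.range' 0 (arr.length + 1) = List.range (arr.length + 1) by
    rw [List.range_eq_range']] at this
  rw [this]
  apply List.map_congr_left
  intro j _
  rfl
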